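-- pv_equiv track=rewrite | github.com/NotKilluaZ/signature-optimal-trading-model | src/sigstop/features/signature_extractor.py | expected_signature_dim
-- ===== SOURCE A (Python) =====
-- def expected_signature_dim(channels: int, depth: int, scalar_term: bool = True) -> int:
--     if channels < 1:
--         raise ValueError(f"Channels must be greater than or equal to 1. Got: {channels}")
--     if depth < 1:
--         raise ValueError(f"Depth must be at least 1. Got: {depth}")
--
--     dim = sum(channels ** k for k in range(1, depth + 1))
--
--     if scalar_term:
--         dim += 1
--
--     return dim
-- ===== SOURCE B (Python) =====
-- def expected_signature_dim(channels: int, depth: int, scalar_term: bool = True) -> int: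
--     if channels < 1:
--         raise ValueError(f"Channels must be greater than or equal to 1. Got: {channels}")
--     if depth < 1:
--         raise ValueError(f"Depth must be at least 1. Got: {depth}")
--
--     dim = depth if channels == 1 else (channels ** (depth + 1) - channels) // (channels - 1)
--
--     if scalar_term:
--         dim += 1
--
--     return dim
-- ===== Notes on version B (the rewrite author's own statement) =====
-- stated objective: faster
-- what changed: Replaced the k=1..depth summation loop of powers with the closed-form geometric-series formula (channels^(depth+1)-channels)//(channels-1), with channels==1 handled as depth.
import Mathlib
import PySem

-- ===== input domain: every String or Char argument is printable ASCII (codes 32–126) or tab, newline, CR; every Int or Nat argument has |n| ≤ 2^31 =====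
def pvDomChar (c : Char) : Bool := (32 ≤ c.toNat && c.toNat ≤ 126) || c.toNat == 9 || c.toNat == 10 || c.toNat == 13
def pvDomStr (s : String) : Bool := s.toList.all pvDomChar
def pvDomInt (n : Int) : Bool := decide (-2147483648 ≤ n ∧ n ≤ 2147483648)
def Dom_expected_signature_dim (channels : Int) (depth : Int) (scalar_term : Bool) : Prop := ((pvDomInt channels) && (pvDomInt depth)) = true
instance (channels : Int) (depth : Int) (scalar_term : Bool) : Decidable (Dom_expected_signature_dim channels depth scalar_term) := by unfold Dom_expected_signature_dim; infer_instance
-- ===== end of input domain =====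

-- B replaces A's k = 1..depth summation loop of powers with the closed-form
-- geometric-series formula (one exponentiation and one exact integer division).

-- ===== PORT A =====
-- dim = sum(channels ** k for k in range(1, depth + 1)); + 1 if scalar_term
def expected_signature_dim (channels : Int) (depth : Int) (scalar_term : Bool) : Int :=
  let dim := (PySem.List.pyRange 1 (depth + 1) 1).foldl (fun acc k => acc + channels ^ k.toNat) 0
  if scalar_term then dim + 1 else dim

-- ===== PORT B =====
-- dim = depth if channels == 1 else (channels**(depth+1) - channels) // (channels-1)
def expected_signature_dim_alt (channels : Int) (depth : Int) (scalar_term : Bool) : Int :=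
  let dim := if channels == 1 then depth
             else PySem.Int.floordiv (channels ^ (depth + 1).toNat - channels) (channels - 1)
  if scalar_term then dim + 1 else dim

-- ===== PRECONDITION & SPEC =====
-- Pre_ excludes exactly the inputs on which A raises ValueError (channels < 1 or depth < 1).
def Pre_expected_signature_dim (channels : Int) (depth : Int) (scalar_term : Bool) : Prop :=
  1 ≤ channels ∧ 1 ≤ depth
instance (channels : Int) (depth : Int) (scalar_term : Bool) : Decidable (Pre_expected_signature_dim channels depth scalar_term) := by unfold Pre_expected_signature_dim; infer_instance
def pvWitness_expected_signature_dim : Int × Int × Bool := (2, 3, true)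

def Spec_expected_signature_dim (channels : Int) (depth : Int) (scalar_term : Bool) (out : Int) : Prop := out = expected_signature_dim_alt channels depth scalar_term
instance (channels : Int) (depth : Int) (scalar_term : Bool) (out : Int) : Decidable (Spec_expected_signature_dim channels depth scalar_term out) := by unfold Spec_expected_signature_dim; infer_instance

-- ===== CLAIM (what is proved, stated in full; the proofs are below) =====
def Claim_equal_expected_signature_dim : Prop := ∀ (channels : Int) (depth : Int) (scalar_term : Bool), Dom_expected_signature_dim channels depth scalar_term → Pre_expected_signature_dim channels depth scalar_term → Spec_expected_signature_dim channels depth scalar_term (expected_signature_dim channels depth scalar_term)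

-- ===== LEMMAS AND PROOFS =====

-- The loop sum over k = 1..n, as A's foldl computes it.
lemma foldl_pow_add (c : Int) (xs : List Int) (a : Int) :
    xs.foldl (fun acc k => acc + c ^ k.toNat) a
      = a + xs.foldl (fun acc k => acc + c ^ k.toNat) 0 := by
  induction xs generalizing a with
  | nil => simp
  | cons x xs ih =>
    simp only [List.foldl_cons]
    rw [ih (a + c ^ x.toNat), ih (0 + c ^ x.toNat)]
    ring

lemma sum_pow_range (c : Int) (n : Nat) :
    (PySem.List.pyRange 1 ((n : Int) + 1) 1).foldl (fun acc k => acc + c ^ k.toNat) 0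
      = ∑ k ∈ Finset.range n, c ^ (k + 1) := by
  induction n with
  | zero => simp [PySem.List.pyRange_one_eq_nil]
  | succ m ih =>
    have h : (1 : Int) ≤ (m : Int) + 1 := by omega
    push_cast
    rw [PySem.List.pyRange_one_succ_right h, List.foldl_append, ih]
    rw [foldl_pow_add]
    have ht : ((m : Int) + 1).toNat = m + 1 := by omega
    simp [Finset.sum_range_succ, ht]

lemma geom_closed (c : Int) (n : Nat) :
    (c - 1) * ∑ k ∈ Finset.range n, c ^ (k + 1) = c ^ (n + 1) - c := by
  induction n with
  | zero => simp
  | succ m ih =>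
    rw [Finset.sum_range_succ, mul_add, ih]
    ring

theorem expected_signature_dim_spec : Claim_equal_expected_signature_dim := by
  intro c d s _ ⟨hc, hd⟩
  unfold Spec_expected_signature_dim expected_signature_dim expected_signature_dim_alt
  have hn : d = ((d.toNat : Nat) : Int) := by omega
  have hsum : (PySem.List.pyRange 1 (d + 1) 1).foldl (fun acc k => acc + c ^ k.toNat) 0
      = ∑ k ∈ Finset.range d.toNat, c ^ (k + 1) := by
    rw [hn]; exact sum_pow_range c d.toNat
  by_cases h1 : c = 1
  · subst h1
    simp only [beq_self_eq_true, if_true]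
    rw [hsum]
    simp
    split <;> omega
  · have hne : (c == 1) = false := by simp [h1]
    simp only [hne, Bool.false_eq_true, if_false]
    have hc2 : 2 ≤ c := by omega
    have hpos : 0 < c - 1 := by omega
    have hkey : c ^ (d + 1).toNat - c = (∑ k ∈ Finset.range d.toNat, c ^ (k + 1)) * (c - 1) := by
      have : (d + 1).toNat = d.toNat + 1 := by omega
      rw [this, mul_comm, geom_closed]
    have hfd : PySem.Int.floordiv (c ^ (d + 1).toNat - c) (c - 1)
        = ∑ k ∈ Finset.range d.toNat, c ^ (k + 1) := by
      rw [PySem.Int.floordiv_eq_ediv_of_pos hpos, hkey]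
      exact Int.mul_ediv_cancel _ (by omega)
    rw [hsum, hfd]
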